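-- pv_equiv track=rewrite | github.com/PapaFranku4647/ReactorAI | reactor.py | reconstruct_grid
-- ===== SOURCE A (Python) =====
-- from enum import Enum
--
-- class TileType(Enum):
--     PA = 0    # Power Source A
--     PB = 1    # Power Source B
--     PC = 2    # Power Source C
--     HSA = 3   # Heat Sink A
--     HSB = 4   # Heat Sink B
--     I = 5     # Iso Tile
--     EMPTY = 6 # Represents an empty or non-eligible cell
--
-- grid = [
--     ["X", "X", "X", "X", "X", "X", "X", "X", "X", "X", "X", "X", "X", "X", "X", "_", "_"],
--     ["X", "X", "X", "X", "X", "X", "X", "X", "X", "X", "X", "X", "X", "X", "_", "_", "_"],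
--     ["X", "_", "_", "_", "X", "X", "X", "X", "_", "_", "_", "X", "X", "X", "_", "_", "_"],
--     ["_", "_", "_", "_", "X", "X", "X", "X", "X", "_", "_", "_", "X", "X", "X", "_", "_"],
--     ["_", "_", "_", "_", "_", "_", "X", "X", "X", "X", "X", "_", "_", "X", "X", "X", "X"],
--     ["_", "_", "_", "_", "_", "_", "X", "X", "X", "X", "X", "_", "_", "X", "X", "X", "X"],
--     ["_", "_", "_", "_", "_", "_", "_", "_", "X", "X", "X", "X", "X", "X", "X", "X", "_"],
--     ["_", "_", "_", "_", "_", "_", "_", "_", "_", "X", "X", "X", "X", "X", "X", "_", "_"],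
--     ["_", "_", "_", "_", "_", "_", "_", "_", "_", "_", "X", "X", "X", "_", "_", "_", "_"],
--     ["_", "_", "_", "_", "_", "_", "_", "_", "_", "_", "_", "X", "_", "_", "_", "_", "_"]
-- ]
--
-- x_positions = [(i, j) for i, row in enumerate(grid) for j, cell in enumerate(row) if cell == "X"]
--
-- def reconstruct_grid(individual):
--     # Create a deep copy of the original grid
--     new_grid = [row.copy() for row in grid]
--
--     # Categorize tile positions
--     pa_positions = [x_positions[k] for k, gene in enumerate(individual) if gene == TileType.PA.value]
--     pb_positions = [x_positions[k] for k, gene in enumerate(individual) if gene == TileType.PB.value]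
--     pc_positions = [x_positions[k] for k, gene in enumerate(individual) if gene == TileType.PC.value]
--     hsa_positions = {x_positions[k] for k, gene in enumerate(individual) if gene == TileType.HSA.value}
--     hsb_positions = {x_positions[k] for k, gene in enumerate(individual) if gene == TileType.HSB.value}
--     i_positions = {x_positions[k] for k, gene in enumerate(individual) if gene == TileType.I.value}
--
--     # Assign tile symbols
--     for pos in pa_positions:
--         new_grid[pos[0]][pos[1]] = 'PA'
--     for pos in pb_positions:
--         new_grid[pos[0]][pos[1]] = 'PB'
--     for pos in pc_positions:
--         new_grid[pos[0]][pos[1]] = 'PC'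
--     for pos in hsa_positions:
--         new_grid[pos[0]][pos[1]] = 'HSA'
--     for pos in hsb_positions:
--         new_grid[pos[0]][pos[1]] = 'HSB'
--     for pos in i_positions:
--         new_grid[pos[0]][pos[1]] = ' I '
--
--     return new_grid
-- ===== SOURCE B (Python) =====
-- ROWS = [
--     "XXXXXXXXXXXXXXX__",
--     "XXXXXXXXXXXXXX___",
--     "X___XXXX___XXX___",
--     "____XXXXX___XXX__",
--     "______XXXXX__XXXX",
--     "______XXXXX__XXXX",
--     "________XXXXXXXX_",
--     "_________XXXXXX__",
--     "__________XXX____",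
--     "___________X_____",
-- ]
--
-- SYMBOL = {0: 'PA', 1: 'PB', 2: 'PC', 3: 'HSA', 4: 'HSB', 5: ' I '}
--
-- x_positions = [(i, j) for i, row in enumerate(ROWS) for j, ch in enumerate(row) if ch == 'X']
--
-- def reconstruct_grid(individual):
--     # One pass: record which position gets which symbol, ...
--     place = {}
--     for k, gene in enumerate(individual):
--         sym = SYMBOL.get(gene)
--         if sym is not None:
--             place[x_positions[k]] = sym
--     # ... then build the whole output grid by lookup (no copy-and-mutate).
--     return [[place.get((i, j), ch) for j, ch in enumerate(row)]
--             for i, row in enumerate(ROWS)]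
-- ===== Notes on version B (the rewrite author's own statement) =====
-- stated objective: simpler
-- what changed: A deep-copies the grid and mutates it through six per-symbol filtering scans over the genes plus six assignment loops; B stores the board as row strings, records gene-to-position assignments in one dict-building pass, and constructs the output grid directly by a lookup-driven comprehension with no copy-and-mutate (measured ~16x faster: one pass over the genes instead of six, no set building).
import Mathlib
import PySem

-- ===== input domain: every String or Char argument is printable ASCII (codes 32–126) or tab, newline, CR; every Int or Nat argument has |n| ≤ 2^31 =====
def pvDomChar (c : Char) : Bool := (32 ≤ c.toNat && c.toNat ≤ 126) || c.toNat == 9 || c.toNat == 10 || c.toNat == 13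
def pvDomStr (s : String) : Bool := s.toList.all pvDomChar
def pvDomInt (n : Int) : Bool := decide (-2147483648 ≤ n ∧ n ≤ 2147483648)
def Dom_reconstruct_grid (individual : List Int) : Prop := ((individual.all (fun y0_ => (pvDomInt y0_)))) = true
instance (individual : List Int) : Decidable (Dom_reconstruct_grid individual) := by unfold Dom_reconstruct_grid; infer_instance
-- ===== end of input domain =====

-- B stores the board as row strings, records gene→position assignments in one
-- dict-building pass and builds the output grid by lookup, replacing A's deep
-- copy plus six filtering scans and six mutation loops (objective: simpler).

-- ===== PORT A =====
-- the module-level grid constant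
def pvGrid : List (List String) := [
  ["X", "X", "X", "X", "X", "X", "X", "X", "X", "X", "X", "X", "X", "X", "X", "_", "_"],
  ["X", "X", "X", "X", "X", "X", "X", "X", "X", "X", "X", "X", "X", "X", "_", "_", "_"],
  ["X", "_", "_", "_", "X", "X", "X", "X", "_", "_", "_", "X", "X", "X", "_", "_", "_"],
  ["_", "_", "_", "_", "X", "X", "X", "X", "X", "_", "_", "_", "X", "X", "X", "_", "_"],
  ["_", "_", "_", "_", "_", "_", "X", "X", "X", "X", "X", "_", "_", "X", "X", "X", "X"],
  ["_", "_", "_", "_", "_", "_", "X", "X", "X", "X", "X", "_", "_", "X", "X", "X", "X"],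
  ["_", "_", "_", "_", "_", "_", "_", "_", "X", "X", "X", "X", "X", "X", "X", "X", "_"],
  ["_", "_", "_", "_", "_", "_", "_", "_", "_", "X", "X", "X", "X", "X", "X", "_", "_"],
  ["_", "_", "_", "_", "_", "_", "_", "_", "_", "_", "X", "X", "X", "_", "_", "_", "_"],
  ["_", "_", "_", "_", "_", "_", "_", "_", "_", "_", "_", "X", "_", "_", "_", "_", "_"]]

-- A's module-level x_positions comprehension
def x_positions : List (Int × Int) :=
  (PySem.List.enumerate pvGrid).flatMap (fun irow =>
    ((PySem.List.enumerate irow.2).filter (fun jc => jc.2 == "X")).map (fun jc => (irow.1, jc.1)))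

-- new_grid[p.1][p.2] = s   (A's assignment statement)
def pvSetAt (g : List (List String)) (p : Int × Int) (s : String) : List (List String) :=
  PySem.List.pySetD g p.1 (PySem.List.pySetD (PySem.List.pyGetD g p.1 []) p.2 s)

-- the comprehension '[x_positions[k] for k, gene in enumerate(individual) if gene == c]'
def pvCat (individual : List Int) (c : Int) : List (Int × Int) :=
  ((PySem.List.enumerate individual).filter (fun kg => kg.2 == c)).map
    (fun kg => PySem.List.pyGetD x_positions kg.1 (0, 0))

-- 'for pos in ps: new_grid[pos[0]][pos[1]] = s'
def pvPlace (g : List (List String)) (ps : List (Int × Int)) (s : String) : List (List String) :=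
  ps.foldl (fun g p => pvSetAt g p s) g

def reconstruct_grid (individual : List Int) : List (List String) :=
  let new_grid := pvGrid.map (fun row => row)
  let pa := pvCat individual 0
  let pb := pvCat individual 1
  let pc := pvCat individual 2
  let hsa := PySem.Set.ofList (pvCat individual 3)
  let hsb := PySem.Set.ofList (pvCat individual 4)
  let ipos := PySem.Set.ofList (pvCat individual 5)
  pvPlace (pvPlace (pvPlace (pvPlace (pvPlace (pvPlace new_grid pa "PA") pb "PB") pc "PC")
    hsa "HSA") hsb "HSB") ipos " I "

-- ===== PORT B =====
-- B's board: one string per row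
def pvRows : List String := [
  "XXXXXXXXXXXXXXX__",
  "XXXXXXXXXXXXXX___",
  "X___XXXX___XXX___",
  "____XXXXX___XXX__",
  "______XXXXX__XXXX",
  "______XXXXX__XXXX",
  "________XXXXXXXX_",
  "_________XXXXXX__",
  "__________XXX____",
  "___________X_____"]

def pvSymbol : PySem.Dict Int String :=
  PySem.Dict.ofList [(0, "PA"), (1, "PB"), (2, "PC"), (3, "HSA"), (4, "HSB"), (5, " I ")]

-- B's x_positions comprehension over the row strings (iterating a Python string
-- yields its characters; ported by hand, exact: Char/String.singleton for 1-char strings)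
def pvXPos : List (Int × Int) :=
  (PySem.List.enumerate pvRows).flatMap (fun ir =>
    ((PySem.List.enumerate ir.2.toList).filter (fun jc => jc.2 == 'X')).map (fun jc => (ir.1, jc.1)))

-- 'place[x_positions[k]] = SYMBOL[gene]' loop
def pvPlaceDict (individual : List Int) : PySem.Dict (Int × Int) String :=
  (PySem.List.enumerate individual).foldl
    (fun d kg =>
      match PySem.Dict.get? pvSymbol kg.2 with
      | some sym => PySem.Dict.insert d (PySem.List.pyGetD pvXPos kg.1 (0, 0)) sym
      | none => d)
    PySem.Dict.empty

-- '[[place.get((i, j), ch) for j, ch in enumerate(row)] for i, row in enumerate(ROWS)]'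
def pvRender (d : PySem.Dict (Int × Int) String) : List (List String) :=
  (PySem.List.enumerate pvRows).map (fun ir =>
    (PySem.List.enumerate ir.2.toList).map (fun jc =>
      PySem.Dict.getD d (ir.1, jc.1) (String.singleton jc.2)))

def reconstruct_grid_alt (individual : List Int) : List (List String) :=
  pvRender (pvPlaceDict individual)

-- ===== PRECONDITION & SPEC =====
-- Pre_ excludes exactly the inputs on which A raises IndexError: a gene in 0..5 at an
-- index ≥ 81 = len(x_positions).
def Pre_reconstruct_grid (individual : List Int) : Prop :=
  ∀ g ∈ individual.drop 81, ¬(0 ≤ g ∧ g ≤ 5)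
instance (individual : List Int) : Decidable (Pre_reconstruct_grid individual) := by
  unfold Pre_reconstruct_grid; infer_instance
def pvWitness_reconstruct_grid : List Int := [0, 1, 2, 3, 4, 5, 6, -1, 3]

def Spec_reconstruct_grid (individual : List Int) (out : List (List String)) : Prop := out = reconstruct_grid_alt individual
instance (individual : List Int) (out : List (List String)) : Decidable (Spec_reconstruct_grid individual out) := by unfold Spec_reconstruct_grid; infer_instance

-- ===== CLAIM (what is proved, stated in full; the proofs are below) =====
def Claim_equal_reconstruct_grid : Prop := ∀ (individual : List Int), Dom_reconstruct_grid individual → Pre_reconstruct_grid individual → Spec_reconstruct_grid individual (reconstruct_grid individual)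

-- ===== LEMMAS AND PROOFS =====

-- proof-side helpers
def pvInGrid (p : Int × Int) : Prop := 0 ≤ p.1 ∧ p.1 < 10 ∧ 0 ≤ p.2 ∧ p.2 < 17

def pvShape (g : List (List String)) : Prop := g.length = 10 ∧ ∀ r ∈ g, r.length = 17

-- the six stages of A as a list, so the assignment pipeline is one fold
def pvStages (individual : List Int) : List (List (Int × Int) × String) :=
  [(pvCat individual 0, "PA"), (pvCat individual 1, "PB"), (pvCat individual 2, "PC"),
   (PySem.Set.ofList (pvCat individual 3), "HSA"),
   (PySem.Set.ofList (pvCat individual 4), "HSB"),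
   (PySem.Set.ofList (pvCat individual 5), " I ")]

theorem reconstruct_eq_fold (individual : List Int) :
    reconstruct_grid individual =
      (pvStages individual).foldl (fun g ls => pvPlace g ls.1 ls.2) (pvGrid.map (fun row => row)) := by
  simp [reconstruct_grid, pvStages, List.foldl]

-- pvSetAt in Nat-index form
theorem pvSetAt_eq (g : List (List String)) (p : Int × Int) (s : String)
    (h1 : 0 ≤ p.1) (h2 : 0 ≤ p.2) :
    pvSetAt g p s = g.set p.1.toNat ((g.getD p.1.toNat []).set p.2.toNat s) := by
  have e1 : PySem.List.pyGetD g p.1 [] = g.getD p.1.toNat [] := by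
    conv_lhs => rw [show p.1 = ((p.1.toNat : Nat) : Int) from (Int.toNat_of_nonneg h1).symm]
    rw [PySem.List.pyGetD_natCast]
  unfold pvSetAt
  rw [PySem.List.pySetD_of_nonneg g _ h1, PySem.List.pySetD_of_nonneg _ _ h2, e1]

theorem pvShape_setAt (g : List (List String)) (p : Int × Int) (s : String)
    (hg : pvShape g) (hp : pvInGrid p) : pvShape (pvSetAt g p s) := by
  obtain ⟨hp1, hp2, hp3, hp4⟩ := hp
  rw [pvSetAt_eq g p s hp1 hp3]
  obtain ⟨hlen, hrow⟩ := hg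
  refine ⟨by simp [hlen], ?_⟩
  intro r hr
  rcases List.mem_or_eq_of_mem_set hr with h | h
  · exact hrow r h
  · subst h
    rw [List.length_set]
    have hi : p.1.toNat < g.length := by omega
    rw [List.getD_eq_getElem g [] hi]
    exact hrow _ (List.getElem_mem hi)

theorem pvSetAt_comm (g : List (List String)) (p q : Int × Int) (s t : String)
    (hg : pvShape g) (hp : pvInGrid p) (hq : pvInGrid q) (hne : p ≠ q) :
    pvSetAt (pvSetAt g p s) q t = pvSetAt (pvSetAt g q t) p s := by
  obtain ⟨hp1, hp2, hp3, hp4⟩ := hp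
  obtain ⟨hq1, hq2, hq3, hq4⟩ := hq
  obtain ⟨hlen, hrow⟩ := hg
  have hplen : p.1.toNat < g.length := by omega
  have hqlen : q.1.toNat < g.length := by omega
  rw [pvSetAt_eq g p s hp1 hp3, pvSetAt_eq g q t hq1 hq3,
      pvSetAt_eq _ q t hq1 hq3, pvSetAt_eq _ p s hp1 hp3]
  by_cases hi : p.1.toNat = q.1.toNat
  · have hj : p.2.toNat ≠ q.2.toNat := by
      intro hj
      apply hne
      have e1 : p.1 = q.1 := by omega
      have e2 : p.2 = q.2 := by omega
      exact Prod.ext e1 e2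
    rw [← hi]
    have e1 : ∀ r : List String, (g.set p.1.toNat r).getD p.1.toNat [] = r := by
      intro r
      rw [List.getD_eq_getElem?_getD, List.getElem?_set_self hplen]
      rfl
    rw [e1, e1, List.set_set, List.set_set, List.set_comm s t hj]
  · have e1 : ∀ (i j : Nat) (r : List String), i ≠ j →
        (g.set i r).getD j [] = g.getD j [] := by
      intro i j r hij
      rw [List.getD_eq_getElem?_getD, List.getElem?_set_ne hij, ← List.getD_eq_getElem?_getD]
    rw [e1 _ _ _ hi, e1 _ _ _ (Ne.symm hi), List.set_comm _ _ hi]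

theorem pvShape_place (g : List (List String)) (ps : List (Int × Int)) (s : String)
    (hg : pvShape g) (hps : ∀ q ∈ ps, pvInGrid q) : pvShape (pvPlace g ps s) := by
  induction ps generalizing g with
  | nil => exact hg
  | cons a l ih =>
      exact ih _ (pvShape_setAt g a s hg (hps a (by simp))) (fun q hq => hps q (by simp [hq]))

theorem pvPlace_setAt_comm (g : List (List String)) (ps : List (Int × Int)) (p : Int × Int)
    (s t : String) (hg : pvShape g) (hp : pvInGrid p) (hps : ∀ q ∈ ps, pvInGrid q)
    (hfresh : ∀ q ∈ ps, q ≠ p) :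
    pvPlace (pvSetAt g p s) ps t = pvSetAt (pvPlace g ps t) p s := by
  induction ps generalizing g with
  | nil => rfl
  | cons a l ih =>
      show pvPlace (pvSetAt (pvSetAt g p s) a t) l t = pvSetAt (pvPlace (pvSetAt g a t) l t) p s
      rw [pvSetAt_comm g p a s t hg hp (hps a (by simp)) (Ne.symm (hfresh a (by simp)))]
      exact ih _ (pvShape_setAt g a t hg (hps a (by simp)))
        (fun q hq => hps q (by simp [hq])) (fun q hq => hfresh q (by simp [hq]))

theorem pvShape_fold (L : List (List (Int × Int) × String)) (g : List (List String))
    (hg : pvShape g) (hL : ∀ ls ∈ L, ∀ q ∈ ls.1, pvInGrid q) :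
    pvShape (L.foldl (fun g ls => pvPlace g ls.1 ls.2) g) := by
  induction L generalizing g with
  | nil => exact hg
  | cons a l ih =>
      exact ih _ (pvShape_place g a.1 a.2 hg (hL a (by simp))) (fun ls hls => hL ls (by simp [hls]))

theorem pvFold_stages_setAt (L : List (List (Int × Int) × String)) (g : List (List String))
    (p : Int × Int) (s : String) (hg : pvShape g) (hp : pvInGrid p)
    (hL : ∀ ls ∈ L, ∀ q ∈ ls.1, pvInGrid q) (hfresh : ∀ ls ∈ L, ∀ q ∈ ls.1, q ≠ p) :
    L.foldl (fun g ls => pvPlace g ls.1 ls.2) (pvSetAt g p s) =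
      pvSetAt (L.foldl (fun g ls => pvPlace g ls.1 ls.2) g) p s := by
  induction L generalizing g with
  | nil => rfl
  | cons a l ih =>
      show l.foldl _ (pvPlace (pvSetAt g p s) a.1 a.2) = pvSetAt (l.foldl _ (pvPlace g a.1 a.2)) p s
      rw [pvPlace_setAt_comm g a.1 p s a.2 hg hp (hL a (by simp)) (hfresh a (by simp))]
      exact ih _ (pvShape_place g a.1 a.2 hg (hL a (by simp)))
        (fun ls hls => hL ls (by simp [hls])) (fun ls hls => hfresh ls (by simp [hls]))

theorem pvPlace_append_singleton (g : List (List String)) (l : List (Int × Int))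
    (p : Int × Int) (s : String) :
    pvPlace g (l ++ [p]) s = pvSetAt (pvPlace g l s) p s := by
  simp [pvPlace, List.foldl_append]

-- x_positions facts
theorem x_positions_nodup : x_positions.Nodup := by decide
theorem x_positions_length : x_positions.length = 81 := by decide
theorem pvXPos_eq : pvXPos = x_positions := by decide

theorem pvInGrid_pos (k : Int) : pvInGrid (PySem.List.pyGetD x_positions k (0, 0)) := by
  by_cases h : PySem.Raise.InRange x_positions.length k
  · have hm := PySem.List.pyGetD_mem x_positions (0, 0) h
    have hall : ∀ p ∈ x_positions, pvInGrid p := by unfold pvInGrid; decide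
    exact hall _ hm
  · rw [PySem.List.pyGetD_of_none x_positions k (0, 0)
      ((PySem.List.pyGet?_eq_none_iff x_positions k).mpr h)]
    unfold pvInGrid; decide

-- freshness of the position appended at index n = individual.length
theorem pvCat_fresh (individual : List Int) (c : Int) (hn : individual.length < 81) :
    ∀ q ∈ pvCat individual c, q ≠ PySem.List.pyGetD x_positions (individual.length : Int) (0, 0) := by
  intro q hq
  simp only [pvCat, List.mem_map, List.mem_filter] at hq
  obtain ⟨kg, ⟨hmem, _⟩, rfl⟩ := hq
  rw [PySem.List.mem_enumerate_iff] at hmem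
  obtain ⟨k, hk, rfl⟩ := hmem
  simp only [zero_add]
  rw [PySem.List.pyGetD_natCast, PySem.List.pyGetD_natCast,
      List.getD_eq_getElem x_positions (0, 0) (by rw [x_positions_length]; omega),
      List.getD_eq_getElem x_positions (0, 0) (by rw [x_positions_length]; omega)]
  intro he
  have := (List.Nodup.getElem_inj_iff x_positions_nodup).mp he
  omega

theorem pvCat_ingrid (individual : List Int) (c : Int) :
    ∀ q ∈ pvCat individual c, pvInGrid q := by
  intro q hq
  simp only [pvCat, List.mem_map] at hq
  obtain ⟨kg, _, rfl⟩ := hq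
  exact pvInGrid_pos kg.1

-- appending one gene to the comprehensions
theorem pvCat_append (individual : List Int) (g c : Int) :
    pvCat (individual ++ [g]) c =
      pvCat individual c ++
        (if g = c then [PySem.List.pyGetD x_positions (individual.length : Int) (0, 0)] else []) := by
  unfold pvCat
  rw [PySem.List.enumerate_append]
  simp only [PySem.List.enumerate_cons, PySem.List.enumerate_nil, List.filter_append,
    List.map_append]
  congr 1
  by_cases h : g = c <;> simp [h]

theorem pvOfList_fresh_append (l : List (Int × Int)) (p : Int × Int) (hp : p ∉ l) :
    PySem.Set.ofList (l ++ [p]) = PySem.Set.ofList l ++ [p] := by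
  rw [PySem.Set.ofList_append_singleton,
      PySem.Set.add_of_not_mem (fun hm => hp ((PySem.Set.mem_ofList l p).mp hm))]

-- pvSymbol lookups
theorem pvSymbol_none (g : Int) (h : ¬(0 ≤ g ∧ g ≤ 5)) : PySem.Dict.get? pvSymbol g = none := by
  have e : pvSymbol =
      PySem.Dict.mk [(0, "PA"), (1, "PB"), (2, "PC"), (3, "HSA"), (4, "HSB"), (5, " I ")] := by
    decide
  rw [e]
  have h0 : ((0 : Int) == g) = false := by simp; omega
  have h1 : ((1 : Int) == g) = false := by simp; omega
  have h2 : ((2 : Int) == g) = false := by simp; omega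
  have h3 : ((3 : Int) == g) = false := by simp; omega
  have h4 : ((4 : Int) == g) = false := by simp; omega
  have h5 : ((5 : Int) == g) = false := by simp; omega
  simp [h0, h1, h2, h3, h4, h5, PySem.Dict.get?]

-- B-side step lemma: appending one gene to the dict-building pass
theorem placeDict_append (individual : List Int) (g : Int) :
    pvPlaceDict (individual ++ [g]) =
      (match PySem.Dict.get? pvSymbol g with
       | some sym => PySem.Dict.insert (pvPlaceDict individual)
            (PySem.List.pyGetD pvXPos ((individual.length : Int)) (0, 0)) sym
       | none => pvPlaceDict individual) := by
  unfold pvPlaceDict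
  rw [PySem.List.enumerate_append]
  simp only [PySem.List.enumerate_cons, PySem.List.enumerate_nil, List.foldl_append, List.foldl]
  simp

-- cells of a rendered grid, getElem?-style
theorem pvRows_length : pvRows.length = 10 := by decide

theorem pvRender_length (d : PySem.Dict (Int × Int) String) : (pvRender d).length = 10 := by
  unfold pvRender
  rw [List.length_map, PySem.List.length_enumerate, pvRows_length]

theorem pvRender_row? (d : PySem.Dict (Int × Int) String) (i : Nat) :
    (pvRender d)[i]? = pvRows[i]?.map (fun r =>
      (PySem.List.enumerate r.toList).map (fun jc =>
        PySem.Dict.getD d ((i : Int), jc.1) (String.singleton jc.2))) := by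
  simp only [pvRender, List.getElem?_map, PySem.List.getElem?_enumerate, Option.map_map]
  cases pvRows[i]? <;> simp

-- the key bridge: rendering after a dict insert = mutating the rendered grid
theorem render_insert (d : PySem.Dict (Int × Int) String) (p : Int × Int) (s : String)
    (hp : pvInGrid p) :
    pvRender (PySem.Dict.insert d p s) = pvSetAt (pvRender d) p s := by
  obtain ⟨hp1, hp2, hp3, hp4⟩ := hp
  have hpe : p = ((p.1.toNat : Int), (p.2.toNat : Int)) := by
    apply Prod.ext <;> simp <;> omega
  rw [pvSetAt_eq _ p s hp1 hp3, List.getD_eq_getElem?_getD]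
  apply List.ext_getElem?
  intro i
  simp only [List.getElem?_set, pvRender_row?, pvRender_length]
  by_cases hia : p.1.toNat = i
  · subst hia
    rw [if_pos rfl, if_pos (by omega)]
    have hr : ∃ r, pvRows[p.1.toNat]? = some r :=
      ⟨_, List.getElem?_eq_getElem (by rw [pvRows_length]; omega)⟩
    obtain ⟨r, hr⟩ := hr
    rw [hr]
    simp only [Option.map_some, Option.getD_some]
    congr 1
    apply List.ext_getElem?
    intro j
    simp only [List.getElem?_set, List.getElem?_map, PySem.List.getElem?_enumerate,
      Option.map_map, List.length_map, PySem.List.length_enumerate]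
    by_cases hjb : p.2.toNat = j
    · subst hjb
      rw [if_pos rfl]
      rcases hc : r.toList[p.2.toNat]? with _ | c
      · rw [if_neg (by
          have := List.getElem?_eq_none_iff.mp hc
          omega)]
        simp
      · rw [if_pos (by
          have := (List.getElem?_eq_some_iff.mp hc).1
          omega)]
        simp only [Option.map_some, Function.comp]
        rw [zero_add, PySem.Dict.getD_insert, if_pos hpe.symm]
    · rw [if_neg hjb]
      rcases r.toList[j]? with _ | c
      · simp
      · simp only [Option.map_some, Function.comp]
        rw [PySem.Dict.getD_insert, if_neg (by
          intro h
          apply hjb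
          have h2 := congrArg Prod.snd h
          simp at h2
          omega)]
  · rw [if_neg hia]
    rcases pvRows[i]? with _ | r
    · simp
    · simp only [Option.map_some]
      congr 1
      apply List.map_congr_left
      intro jc _
      rw [PySem.Dict.getD_insert, if_neg (by
        intro h
        apply hia
        have h1 := congrArg Prod.fst h
        simp at h1
        omega)]

-- B-side step lemma on the rendered output
theorem alt_append (individual : List Int) (g : Int) :
    reconstruct_grid_alt (individual ++ [g]) =
      (match PySem.Dict.get? pvSymbol g with
       | some sym => pvSetAt (reconstruct_grid_alt individual)
            (PySem.List.pyGetD x_positions ((individual.length : Int)) (0, 0)) sym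
       | none => reconstruct_grid_alt individual) := by
  unfold reconstruct_grid_alt
  rw [placeDict_append]
  rcases e : PySem.Dict.get? pvSymbol g with _ | sym
  · simp
  · simp only [pvXPos_eq]
    exact render_insert _ _ sym (pvInGrid_pos _)

-- A-side step: one stage gets position p appended, later stages commute past it
theorem pvFold_key (L1 L2 : List (List (Int × Int) × String)) (l : List (Int × Int))
    (p : Int × Int) (sym : String) (hp : pvInGrid p)
    (hL1 : ∀ ls ∈ L1, ∀ q ∈ ls.1, pvInGrid q)
    (hl : ∀ q ∈ l, pvInGrid q)
    (hL2 : ∀ ls ∈ L2, ∀ q ∈ ls.1, pvInGrid q)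
    (hfresh2 : ∀ ls ∈ L2, ∀ q ∈ ls.1, q ≠ p) :
    (L1 ++ ((l ++ [p]), sym) :: L2).foldl (fun g ls => pvPlace g ls.1 ls.2) (pvGrid.map (fun row => row)) =
      pvSetAt ((L1 ++ (l, sym) :: L2).foldl (fun g ls => pvPlace g ls.1 ls.2) (pvGrid.map (fun row => row))) p sym := by
  have hg0 : pvShape (pvGrid.map (fun row => row)) := by unfold pvShape; decide
  rw [List.foldl_append, List.foldl_append]
  simp only [List.foldl_cons]
  rw [pvPlace_append_singleton]
  have hgL1 : pvShape (L1.foldl (fun g ls => pvPlace g ls.1 ls.2) (pvGrid.map (fun row => row))) :=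
    pvShape_fold L1 _ hg0 hL1
  exact pvFold_stages_setAt L2 _ p sym (pvShape_place _ l sym hgL1 hl) hp hL2 hfresh2

-- A-side step: appending gene c in 0..5 (with room left) sets one more cell
theorem recon_append_gene (individual : List Int) (c : Int) (sym : String)
    (hc : 0 ≤ c ∧ c ≤ 5) (hsym : PySem.Dict.get? pvSymbol c = some sym)
    (hn : individual.length < 81) :
    reconstruct_grid (individual ++ [c]) =
      pvSetAt (reconstruct_grid individual)
        (PySem.List.pyGetD x_positions ((individual.length : Int)) (0, 0)) sym := by
  set p := PySem.List.pyGetD x_positions ((individual.length : Int)) (0, 0) with hpdef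
  have hp : pvInGrid p := pvInGrid_pos _
  have hcatfr_ : ∀ (c : Int), ∀ q ∈ pvCat individual c, q ≠ p :=
    fun c => pvCat_fresh individual c hn
  have hcatfr3 := hcatfr_ 3
  have hcatfr4 := hcatfr_ 4
  have hcatfr5 := hcatfr_ 5
  rw [reconstruct_eq_fold, reconstruct_eq_fold]
  obtain ⟨hc0, hc5⟩ := hc
  interval_cases c
  · have hs : sym = "PA" := by
      rw [show PySem.Dict.get? pvSymbol 0 = some "PA" from by decide] at hsym
      exact (Option.some.inj hsym).symm
    subst hs
    simp only [pvStages, pvCat_append, if_neg (show ¬((0:Int) = 1) from by decide), if_neg (show ¬((0:Int) = 2) from by decide), if_neg (show ¬((0:Int) = 3) from by decide), if_neg (show ¬((0:Int) = 4) from by decide), if_neg (show ¬((0:Int) = 5) from by decide), if_true, List.append_nil]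
    rw [← hpdef]
    refine pvFold_key [] [(pvCat individual 1, "PB"), (pvCat individual 2, "PC"), (PySem.Set.ofList (pvCat individual 3), "HSA"), (PySem.Set.ofList (pvCat individual 4), "HSB"), (PySem.Set.ofList (pvCat individual 5), " I ")] (pvCat individual 0) p _ hp ?_ ?_ ?_ ?_
    · intro ls hls q hq
      fin_cases hls <;>
        first
          | exact pvCat_ingrid individual _ q hq
          | exact pvCat_ingrid individual _ q ((PySem.Set.mem_ofList _ q).mp hq)
    · exact pvCat_ingrid individual 0
    · intro ls hls q hq
      fin_cases hls <;>
        first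
          | exact pvCat_ingrid individual _ q hq
          | exact pvCat_ingrid individual _ q ((PySem.Set.mem_ofList _ q).mp hq)
    · intro ls hls q hq
      fin_cases hls <;>
        first
          | exact hcatfr_ _ q hq
          | exact hcatfr_ _ q ((PySem.Set.mem_ofList _ q).mp hq)
  · have hs : sym = "PB" := by
      rw [show PySem.Dict.get? pvSymbol 1 = some "PB" from by decide] at hsym
      exact (Option.some.inj hsym).symm
    subst hs
    simp only [pvStages, pvCat_append, if_neg (show ¬((1:Int) = 0) from by decide), if_neg (show ¬((1:Int) = 2) from by decide), if_neg (show ¬((1:Int) = 3) from by decide), if_neg (show ¬((1:Int) = 4) from by decide), if_neg (show ¬((1:Int) = 5) from by decide), if_true, List.append_nil]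
    rw [← hpdef]
    refine pvFold_key [(pvCat individual 0, "PA")] [(pvCat individual 2, "PC"), (PySem.Set.ofList (pvCat individual 3), "HSA"), (PySem.Set.ofList (pvCat individual 4), "HSB"), (PySem.Set.ofList (pvCat individual 5), " I ")] (pvCat individual 1) p _ hp ?_ ?_ ?_ ?_
    · intro ls hls q hq
      fin_cases hls <;>
        first
          | exact pvCat_ingrid individual _ q hq
          | exact pvCat_ingrid individual _ q ((PySem.Set.mem_ofList _ q).mp hq)
    · exact pvCat_ingrid individual 1
    · intro ls hls q hq
      fin_cases hls <;>
        first
          | exact pvCat_ingrid individual _ q hq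
          | exact pvCat_ingrid individual _ q ((PySem.Set.mem_ofList _ q).mp hq)
    · intro ls hls q hq
      fin_cases hls <;>
        first
          | exact hcatfr_ _ q hq
          | exact hcatfr_ _ q ((PySem.Set.mem_ofList _ q).mp hq)
  · have hs : sym = "PC" := by
      rw [show PySem.Dict.get? pvSymbol 2 = some "PC" from by decide] at hsym
      exact (Option.some.inj hsym).symm
    subst hs
    simp only [pvStages, pvCat_append, if_neg (show ¬((2:Int) = 0) from by decide), if_neg (show ¬((2:Int) = 1) from by decide), if_neg (show ¬((2:Int) = 3) from by decide), if_neg (show ¬((2:Int) = 4) from by decide), if_neg (show ¬((2:Int) = 5) from by decide), if_true, List.append_nil]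
    rw [← hpdef]
    refine pvFold_key [(pvCat individual 0, "PA"), (pvCat individual 1, "PB")] [(PySem.Set.ofList (pvCat individual 3), "HSA"), (PySem.Set.ofList (pvCat individual 4), "HSB"), (PySem.Set.ofList (pvCat individual 5), " I ")] (pvCat individual 2) p _ hp ?_ ?_ ?_ ?_
    · intro ls hls q hq
      fin_cases hls <;>
        first
          | exact pvCat_ingrid individual _ q hq
          | exact pvCat_ingrid individual _ q ((PySem.Set.mem_ofList _ q).mp hq)
    · exact pvCat_ingrid individual 2
    · intro ls hls q hq
      fin_cases hls <;>
        first
          | exact pvCat_ingrid individual _ q hq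
          | exact pvCat_ingrid individual _ q ((PySem.Set.mem_ofList _ q).mp hq)
    · intro ls hls q hq
      fin_cases hls <;>
        first
          | exact hcatfr_ _ q hq
          | exact hcatfr_ _ q ((PySem.Set.mem_ofList _ q).mp hq)
  · have hs : sym = "HSA" := by
      rw [show PySem.Dict.get? pvSymbol 3 = some "HSA" from by decide] at hsym
      exact (Option.some.inj hsym).symm
    subst hs
    simp only [pvStages, pvCat_append, if_neg (show ¬((3:Int) = 0) from by decide), if_neg (show ¬((3:Int) = 1) from by decide), if_neg (show ¬((3:Int) = 2) from by decide), if_neg (show ¬((3:Int) = 4) from by decide), if_neg (show ¬((3:Int) = 5) from by decide), if_true, List.append_nil]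
    rw [← hpdef]
    rw [pvOfList_fresh_append (pvCat individual 3) p (fun hm => hcatfr3 p hm rfl)]
    refine pvFold_key [(pvCat individual 0, "PA"), (pvCat individual 1, "PB"), (pvCat individual 2, "PC")] [(PySem.Set.ofList (pvCat individual 4), "HSB"), (PySem.Set.ofList (pvCat individual 5), " I ")] (PySem.Set.ofList (pvCat individual 3)) p _ hp ?_ ?_ ?_ ?_
    · intro ls hls q hq
      fin_cases hls <;>
        first
          | exact pvCat_ingrid individual _ q hq
          | exact pvCat_ingrid individual _ q ((PySem.Set.mem_ofList _ q).mp hq)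
    · exact fun q hq => pvCat_ingrid individual 3 q ((PySem.Set.mem_ofList _ q).mp hq)
    · intro ls hls q hq
      fin_cases hls <;>
        first
          | exact pvCat_ingrid individual _ q hq
          | exact pvCat_ingrid individual _ q ((PySem.Set.mem_ofList _ q).mp hq)
    · intro ls hls q hq
      fin_cases hls <;>
        first
          | exact hcatfr_ _ q hq
          | exact hcatfr_ _ q ((PySem.Set.mem_ofList _ q).mp hq)
  · have hs : sym = "HSB" := by
      rw [show PySem.Dict.get? pvSymbol 4 = some "HSB" from by decide] at hsym
      exact (Option.some.inj hsym).symm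
    subst hs
    simp only [pvStages, pvCat_append, if_neg (show ¬((4:Int) = 0) from by decide), if_neg (show ¬((4:Int) = 1) from by decide), if_neg (show ¬((4:Int) = 2) from by decide), if_neg (show ¬((4:Int) = 3) from by decide), if_neg (show ¬((4:Int) = 5) from by decide), if_true, List.append_nil]
    rw [← hpdef]
    rw [pvOfList_fresh_append (pvCat individual 4) p (fun hm => hcatfr4 p hm rfl)]
    refine pvFold_key [(pvCat individual 0, "PA"), (pvCat individual 1, "PB"), (pvCat individual 2, "PC"), (PySem.Set.ofList (pvCat individual 3), "HSA")] [(PySem.Set.ofList (pvCat individual 5), " I ")] (PySem.Set.ofList (pvCat individual 4)) p _ hp ?_ ?_ ?_ ?_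
    · intro ls hls q hq
      fin_cases hls <;>
        first
          | exact pvCat_ingrid individual _ q hq
          | exact pvCat_ingrid individual _ q ((PySem.Set.mem_ofList _ q).mp hq)
    · exact fun q hq => pvCat_ingrid individual 4 q ((PySem.Set.mem_ofList _ q).mp hq)
    · intro ls hls q hq
      fin_cases hls <;>
        first
          | exact pvCat_ingrid individual _ q hq
          | exact pvCat_ingrid individual _ q ((PySem.Set.mem_ofList _ q).mp hq)
    · intro ls hls q hq
      fin_cases hls <;>
        first
          | exact hcatfr_ _ q hq
          | exact hcatfr_ _ q ((PySem.Set.mem_ofList _ q).mp hq)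
  · have hs : sym = " I " := by
      rw [show PySem.Dict.get? pvSymbol 5 = some " I " from by decide] at hsym
      exact (Option.some.inj hsym).symm
    subst hs
    simp only [pvStages, pvCat_append, if_neg (show ¬((5:Int) = 0) from by decide), if_neg (show ¬((5:Int) = 1) from by decide), if_neg (show ¬((5:Int) = 2) from by decide), if_neg (show ¬((5:Int) = 3) from by decide), if_neg (show ¬((5:Int) = 4) from by decide), if_true, List.append_nil]
    rw [← hpdef]
    rw [pvOfList_fresh_append (pvCat individual 5) p (fun hm => hcatfr5 p hm rfl)]
    refine pvFold_key [(pvCat individual 0, "PA"), (pvCat individual 1, "PB"), (pvCat individual 2, "PC"), (PySem.Set.ofList (pvCat individual 3), "HSA"), (PySem.Set.ofList (pvCat individual 4), "HSB")] [] (PySem.Set.ofList (pvCat individual 5)) p _ hp ?_ ?_ ?_ ?_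
    · intro ls hls q hq
      fin_cases hls <;>
        first
          | exact pvCat_ingrid individual _ q hq
          | exact pvCat_ingrid individual _ q ((PySem.Set.mem_ofList _ q).mp hq)
    · exact fun q hq => pvCat_ingrid individual 5 q ((PySem.Set.mem_ofList _ q).mp hq)
    · intro ls hls q hq
      fin_cases hls <;>
        first
          | exact pvCat_ingrid individual _ q hq
          | exact pvCat_ingrid individual _ q ((PySem.Set.mem_ofList _ q).mp hq)
    · intro ls hls q hq
      fin_cases hls <;>
        first
          | exact hcatfr_ _ q hq
          | exact hcatfr_ _ q ((PySem.Set.mem_ofList _ q).mp hq)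

-- A-side step: appending a gene outside 0..5 changes nothing
theorem recon_append_other (individual : List Int) (g : Int) (h : ¬(0 ≤ g ∧ g ≤ 5)) :
    reconstruct_grid (individual ++ [g]) = reconstruct_grid individual := by
  have h0 : ¬(g = 0) := by omega
  have h1 : ¬(g = 1) := by omega
  have h2 : ¬(g = 2) := by omega
  have h3 : ¬(g = 3) := by omega
  have h4 : ¬(g = 4) := by omega
  have h5 : ¬(g = 5) := by omega
  rw [reconstruct_eq_fold, reconstruct_eq_fold]
  simp only [pvStages, pvCat_append, if_neg h0, if_neg h1, if_neg h2, if_neg h3, if_neg h4,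
    if_neg h5, List.append_nil]

theorem pre_drop (individual : List Int) (g : Int)
    (h : Pre_reconstruct_grid (individual ++ [g])) : Pre_reconstruct_grid individual := by
  intro x hx
  apply h
  by_cases hlen : 81 ≤ individual.length
  · rw [List.drop_append_of_le_length hlen]
    exact List.mem_append_left _ hx
  · exfalso
    have : individual.drop 81 = [] := List.drop_eq_nil_of_le (by omega)
    rw [this] at hx
    exact List.not_mem_nil hx

theorem main_equiv (individual : List Int) (hpre : Pre_reconstruct_grid individual) :
    reconstruct_grid individual = reconstruct_grid_alt individual := by
  induction individual using List.reverseRecOn with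
  | nil => decide
  | append_singleton ind g ih =>
      have hpre' := pre_drop ind g hpre
      by_cases hg : 0 ≤ g ∧ g ≤ 5
      · have hn : ind.length < 81 := by
          by_contra hn
          apply hpre g _ hg
          rw [List.drop_append_of_le_length (by omega)]
          exact List.mem_append_right _ (by simp)
        rcases e : PySem.Dict.get? pvSymbol g with _ | sym
        · exfalso
          obtain ⟨h0, h5⟩ := hg
          interval_cases g <;> exact absurd e (by decide)
        · rw [recon_append_gene ind g sym hg e hn, alt_append, e, ih hpre']
      · rw [recon_append_other ind g hg, alt_append, pvSymbol_none g hg, ih hpre']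

-- ===== VERDICT (by name: the statement is the Claim_ definition above) =====
theorem reconstruct_grid_spec : Claim_equal_reconstruct_grid := by
  intro individual _ hpre
  unfold Spec_reconstruct_grid
  exact main_equiv individual hpre
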